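-- pv_equiv track=rewrite | github.com/daniel5426/talmudpedia | backend/app/agent/execution/chat_response_blocks.py | _is_provider_structured_tool_delta_text
-- ===== SOURCE A (Python) =====
-- from typing import Any
--
-- def _is_provider_structured_tool_delta_text(value: Any) -> bool:
--     if not isinstance(value, str):
--         return False
--     trimmed = value.strip()
--     if not trimmed.startswith("{") or not trimmed.endswith("}"):
--         return False
--     normalized = trimmed.replace('"', "'")
--     structured_types = (
--         "tool_use",
--         "input_json_delta",
--         "tool_call",
--         "tool_call_chunk",
--         "server_tool_call",
--         "server_tool_call_chunk",
--     )
--     return any(f"'type': '{item}'" in normalized for item in structured_types)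
-- ===== SOURCE B (Python) =====
-- def _is_provider_structured_tool_delta_text(value) -> bool:
--     if not isinstance(value, str):
--         return False
--     trimmed = value.strip()
--     if not trimmed.startswith("{") or not trimmed.endswith("}"):
--         return False
--     normalized = trimmed.replace('"', "'")
--     structured_types = frozenset((
--         "tool_use",
--         "input_json_delta",
--         "tool_call",
--         "tool_call_chunk",
--         "server_tool_call",
--         "server_tool_call_chunk",
--     ))
--     marker = "'type': '"
--     m = len(marker)
--     # single left-to-right parse: at each marker occurrence read the quoted
--     # value up to the next quote and test set membership
--     for i in range(len(normalized)):
--         if normalized.startswith(marker, i):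
--             j = normalized.find("'", i + m)
--             if j != -1 and normalized[i + m:j] in structured_types:
--                 return True
--     return False
-- ===== Notes on version B (the rewrite author's own statement) =====
-- stated objective: alternative
-- what changed: A runs six separate whole-string substring scans, one per structured type name; B makes a single left-to-right parse that at each type-marker occurrence reads the quoted value up to the next quote and tests membership in a frozenset of the six names.
import Mathlib
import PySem

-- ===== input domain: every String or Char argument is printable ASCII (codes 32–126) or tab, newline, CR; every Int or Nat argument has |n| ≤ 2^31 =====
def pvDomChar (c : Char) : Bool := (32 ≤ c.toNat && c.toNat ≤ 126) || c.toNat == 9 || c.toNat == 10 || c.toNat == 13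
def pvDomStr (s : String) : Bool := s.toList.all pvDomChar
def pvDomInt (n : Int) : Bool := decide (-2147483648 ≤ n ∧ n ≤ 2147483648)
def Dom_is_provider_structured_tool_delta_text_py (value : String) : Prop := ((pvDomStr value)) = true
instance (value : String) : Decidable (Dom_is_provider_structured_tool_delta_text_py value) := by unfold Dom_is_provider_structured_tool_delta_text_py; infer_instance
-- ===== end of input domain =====

-- B replaces A's six whole-string substring scans by one left-to-right parse that reads each
-- "'type': '…'" value and tests set membership (objective: alternative single-pass structure).

-- ===== PORT A =====
-- the argument is a String, so Python's isinstance(value, str) guard is always true here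
def is_provider_structured_tool_delta_text_py (value : String) : Bool :=
  let trimmed := PySem.Str.strip value
  if !(PySem.Str.startswith trimmed "{") || !(PySem.Str.endswith trimmed "}") then
    false
  else
    let normalized := PySem.Str.replace trimmed "\"" "'"
    (["tool_use", "input_json_delta", "tool_call", "tool_call_chunk",
      "server_tool_call", "server_tool_call_chunk"] : List String).any
      (fun item => PySem.Str.isIn ("'type': '" ++ item ++ "'") normalized)

-- ===== PORT B =====
def pvMarkerB : List Char := "'type': '".toList

def pvTailsB : List (List Char) :=
  ["tool_use".toList, "input_json_delta".toList, "tool_call".toList,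
   "tool_call_chunk".toList, "server_tool_call".toList, "server_tool_call_chunk".toList]

def pvStructuredTypesB : PySem.Set (List Char) := PySem.Set.ofList pvTailsB

-- Source B: j = normalized.find("'", i + m); j != -1 and normalized[i + m:j] in structured_types
-- (the slice up to the first quote is takeWhile; 'j != -1' is the dropWhile being nonempty)
def pvCheckValB (rest : List Char) : Bool :=
  match rest.dropWhile (· ≠ '\'') with
  | '\'' :: _ => pvStructuredTypesB.contains (rest.takeWhile (· ≠ '\''))
  | _ => false

-- Source B's 'for i in range(len(normalized))' with startswith(marker, i)
def pvScanB : List Char → Bool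
  | [] => false
  | c :: cs =>
      (pvMarkerB.isPrefixOf (c :: cs) && pvCheckValB ((c :: cs).drop pvMarkerB.length))
        || pvScanB cs

def is_provider_structured_tool_delta_text_py_alt (value : String) : Bool :=
  let trimmed := PySem.Str.strip value
  if !(PySem.Str.startswith trimmed "{") || !(PySem.Str.endswith trimmed "}") then
    false
  else
    pvScanB (PySem.Str.replace trimmed "\"" "'").toList

-- ===== PRECONDITION & SPEC =====
def Spec_is_provider_structured_tool_delta_text_py (value : String) (out : Bool) : Prop := out = is_provider_structured_tool_delta_text_py_alt value
instance (value : String) (out : Bool) : Decidable (Spec_is_provider_structured_tool_delta_text_py value out) := by unfold Spec_is_provider_structured_tool_delta_text_py; infer_instance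

-- ===== CLAIM (what is proved, stated in full; the proofs are below) =====
def Claim_equal_is_provider_structured_tool_delta_text_py : Prop := ∀ (value : String), Dom_is_provider_structured_tool_delta_text_py value → Spec_is_provider_structured_tool_delta_text_py value (is_provider_structured_tool_delta_text_py value)

-- ===== LEMMAS AND PROOFS =====

lemma pv_tails_quote_free : ∀ t ∈ pvTailsB, t.all (· ≠ '\'') = true := by decide

lemma pv_checkVal_iff (R : List Char) :
    pvCheckValB R = true ↔ ∃ t ∈ pvTailsB, t ++ ['\''] <+: R := by
  constructor
  · intro h
    unfold pvCheckValB at h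
    rcases hd : R.dropWhile (· ≠ '\'') with _ | ⟨c, rest⟩
    · rw [hd] at h; exact absurd h (by simp)
    · rw [hd] at h
      have hc : c = '\'' := by
        by_contra hne
        rw [show (match (c :: rest : List Char) with
              | '\'' :: _ => pvStructuredTypesB.contains (R.takeWhile (· ≠ '\''))
              | _ => false) = false from by
          cases c; simp_all] at h
        exact absurd h (by simp)
      subst hc
      simp only [pvStructuredTypesB] at h
      have hmem : R.takeWhile (· ≠ '\'') ∈ pvTailsB :=
        (PySem.Set.mem_ofList _ _).mp ((PySem.Set.contains_iff _ _).mp h)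
      refine ⟨R.takeWhile (· ≠ '\''), hmem, ⟨rest, ?_⟩⟩
      calc R.takeWhile (· ≠ '\'') ++ ['\''] ++ rest
          = R.takeWhile (· ≠ '\'') ++ ('\'' :: rest) := by simp
        _ = R.takeWhile (· ≠ '\'') ++ R.dropWhile (· ≠ '\'') := by rw [hd]
        _ = R := List.takeWhile_append_dropWhile
  · rintro ⟨t, ht, u, rfl⟩
    have hq : ∀ x ∈ t, ¬ x = '\'' := by simpa using pv_tails_quote_free t ht
    have htake : ((t ++ ['\'']) ++ u).takeWhile (· ≠ '\'') = t := by
      rw [List.append_assoc]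
      rw [List.takeWhile_append]
      simp
      exact fun _ => hq
    have hdrop : ((t ++ ['\'']) ++ u).dropWhile (· ≠ '\'') = '\'' :: u := by
      rw [List.append_assoc]
      rw [List.dropWhile_append]
      simp
      exact fun _ => hq
    unfold pvCheckValB
    rw [hdrop, htake]
    simp only [pvStructuredTypesB]
    exact (PySem.Set.contains_iff _ _).mpr ((PySem.Set.mem_ofList _ _).mpr ht)

lemma pv_pos_iff (L : List Char) :
    (pvMarkerB.isPrefixOf L && pvCheckValB (L.drop pvMarkerB.length)) = true ↔
      ∃ t ∈ pvTailsB, pvMarkerB ++ (t ++ ['\'']) <+: L := by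
  rw [Bool.and_eq_true, List.isPrefixOf_iff_prefix]
  constructor
  · rintro ⟨⟨R, rfl⟩, h⟩
    rw [List.drop_left] at h
    obtain ⟨t, ht, hp⟩ := (pv_checkVal_iff R).mp h
    exact ⟨t, ht, (List.prefix_append_right_inj pvMarkerB).mpr hp⟩
  · rintro ⟨t, ht, hp⟩
    have hm : pvMarkerB <+: L := List.IsPrefix.trans (List.prefix_append _ _) hp
    obtain ⟨R, rfl⟩ := hm
    refine ⟨⟨R, rfl⟩, ?_⟩
    rw [List.drop_left]
    exact (pv_checkVal_iff R).mpr ⟨t, ht, (List.prefix_append_right_inj pvMarkerB).mp hp⟩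

lemma pv_scan_iff (l : List Char) :
    pvScanB l = true ↔ ∃ t ∈ pvTailsB, pvMarkerB ++ (t ++ ['\'']) <:+: l := by
  induction l with
  | nil =>
      simp only [pvScanB, Bool.false_eq_true, false_iff]
      rintro ⟨t, _, h⟩
      have := List.eq_nil_of_infix_nil h
      simp [pvMarkerB] at this
  | cons c cs ih =>
      simp only [pvScanB, Bool.or_eq_true, pv_pos_iff, ih]
      constructor
      · rintro (⟨t, ht, h⟩ | ⟨t, ht, h⟩)
        · exact ⟨t, ht, List.infix_cons_iff.mpr (Or.inl h)⟩
        · exact ⟨t, ht, List.infix_cons_iff.mpr (Or.inr h)⟩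
      · rintro ⟨t, ht, h⟩
        rcases List.infix_cons_iff.mp h with h' | h'
        · exact Or.inl ⟨t, ht, h'⟩
        · exact Or.inr ⟨t, ht, h'⟩

lemma pv_pat_toList (item : String) :
    ("'type': '" ++ item ++ "'").toList = pvMarkerB ++ (item.toList ++ ['\'']) := by
  simp [pvMarkerB]

lemma pv_core_eq (l : List Char) :
    ((["tool_use", "input_json_delta", "tool_call", "tool_call_chunk",
       "server_tool_call", "server_tool_call_chunk"] : List String).any
      (fun item => PySem.Chars.isIn ("'type': '" ++ item ++ "'").toList l)) = pvScanB l := by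
  rw [Bool.eq_iff_iff, pv_scan_iff]
  simp only [List.any_cons, List.any_nil, Bool.or_eq_true, Bool.false_eq_true, or_false,
    PySem.Chars.isIn_iff_infix, pv_pat_toList]
  constructor
  · rintro (h | h | h | h | h | h)
    · exact ⟨"tool_use".toList, by simp [pvTailsB], h⟩
    · exact ⟨"input_json_delta".toList, by simp [pvTailsB], h⟩
    · exact ⟨"tool_call".toList, by simp [pvTailsB], h⟩
    · exact ⟨"tool_call_chunk".toList, by simp [pvTailsB], h⟩
    · exact ⟨"server_tool_call".toList, by simp [pvTailsB], h⟩
    · exact ⟨"server_tool_call_chunk".toList, by simp [pvTailsB], h⟩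
  · rintro ⟨t, ht, h⟩
    simp only [pvTailsB, List.mem_cons, List.not_mem_nil, or_false] at ht
    rcases ht with rfl | rfl | rfl | rfl | rfl | rfl
    · exact Or.inl h
    · exact Or.inr (Or.inl h)
    · exact Or.inr (Or.inr (Or.inl h))
    · exact Or.inr (Or.inr (Or.inr (Or.inl h)))
    · exact Or.inr (Or.inr (Or.inr (Or.inr (Or.inl h))))
    · exact Or.inr (Or.inr (Or.inr (Or.inr (Or.inr h))))

-- ===== VERDICT (by name: the statement is the Claim_ definition above) =====
theorem is_provider_structured_tool_delta_text_py_spec : Claim_equal_is_provider_structured_tool_delta_text_py := by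
  intro value _
  unfold Spec_is_provider_structured_tool_delta_text_py
  unfold is_provider_structured_tool_delta_text_py is_provider_structured_tool_delta_text_py_alt
  by_cases h : (!(PySem.Str.startswith (PySem.Str.strip value) "{")
      || !(PySem.Str.endswith (PySem.Str.strip value) "}")) = true
  · simp only [h, if_true]
  · simp only [Bool.not_eq_true] at h
    simp only [h, Bool.false_eq_true, if_false, PySem.Str.isIn_eq]
    -- h rewrites the shared guard to false in both branches
    exact pv_core_eq _
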